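-- pv_equiv track=rewrite | github.com/UU-THU-Courses/UU-Cryptology | Labs/Part-B/cryptanalysis_longkeys_v1.py | find_repeated_substrings
-- ===== SOURCE A (Python) =====
-- def find_all_substrings(in_string, min_size = 3, max_size = 6):
--     """A function to split the string into substrings of specific size."""
--     substrings = []
--     # Find all substrings of minimum size = min_size and
--     # maximum size = max_size
--     for subsize in range(min_size, max_size+1):
--         substrings.append([in_string[i:i+subsize] for i in range(len(in_string)-subsize+1)])
--     # Return all substrings made from original string
--     return substrings
--
-- def find_repeated_substrings(in_string, min_size = 3, max_size = 6):
--     """A function to find all repeated substrings along with distance between instances of these repetitions."""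
--
--     # First find all splits of the string of particular size ~ 3 - 6
--     # We only process size 3 - 6 because roughly 80% of swedish words
--     # are of size 3 - 6 as given by this paper: https://math.wvu.edu/~hdiamond/Math222F17/Sigurd_et_al-2004-Studia_Linguistica.pdf
--     all_substrings = find_all_substrings(in_string, min_size, max_size)
--
--     # Go through all splits and find repeating patterns
--     all_distances = {}
--     for subsplit in all_substrings:
--         for current_idx, current_item in enumerate(subsplit):
--             # Perform forward search into the list only
--             # as we want to find only the distance
--             # between two contigious repetitions.
--             if current_item in subsplit[current_idx+1:]:
--                 matching_index = current_idx + 1 + subsplit[current_idx+1:].index(current_item)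
--                 # If the key appeared first time, add
--                 # a new entry for it otherwise append
--                 # to existing entry of current key
--                 if current_item not in all_distances:
--                     all_distances[current_item] = []
--                 all_distances[current_item].append(matching_index - current_idx)
--
--     # Return all the repeated substrings with distances
--     return all_distances
-- ===== SOURCE B (Python) =====
-- def find_repeated_substrings(in_string, min_size=3, max_size=6):
--     """One pass per size: hash each substring to its ordered position list,
--     then distances are consecutive-position differences."""
--     all_distances = {}
--     n = len(in_string)
--     for subsize in range(min_size, max_size + 1):
--         positions = {}
--         for i in range(n - subsize + 1):
--             positions.setdefault(in_string[i:i + subsize], []).append(i)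
--         for key, ps in positions.items():
--             if len(ps) > 1:
--                 all_distances.setdefault(key, []).extend(q - p for p, q in zip(ps, ps[1:]))
--     return all_distances
-- ===== Notes on version B (the rewrite author's own statement) =====
-- stated objective: faster
-- what changed: A does a quadratic forward search per position (membership test plus list.index on the remaining suffix) for every substring size; B makes one hashing pass per size building a dict substring -> ordered position list and emits consecutive-position differences, removing the inner scans.
import Mathlib
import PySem

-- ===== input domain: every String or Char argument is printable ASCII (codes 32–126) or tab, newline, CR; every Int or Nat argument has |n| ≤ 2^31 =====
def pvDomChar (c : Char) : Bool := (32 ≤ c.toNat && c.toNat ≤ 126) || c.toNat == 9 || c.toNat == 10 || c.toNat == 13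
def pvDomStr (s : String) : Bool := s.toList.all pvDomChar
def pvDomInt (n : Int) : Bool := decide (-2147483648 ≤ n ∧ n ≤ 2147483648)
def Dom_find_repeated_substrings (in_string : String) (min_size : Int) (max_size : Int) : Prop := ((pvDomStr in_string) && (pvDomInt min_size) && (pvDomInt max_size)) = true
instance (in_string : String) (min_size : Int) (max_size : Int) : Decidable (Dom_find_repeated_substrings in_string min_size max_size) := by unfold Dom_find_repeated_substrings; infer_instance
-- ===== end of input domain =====

-- B replaces A's quadratic per-size forward search (membership test + list.index at every
-- position) by one hashing pass per size: substring -> ordered position list, distances =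
-- consecutive-position differences (objective: faster).

-- ===== PORT A =====
def find_all_substrings (in_string : String) (min_size : Int) (max_size : Int) : List (List String) :=
  (PySem.List.pyRange min_size (max_size + 1)).foldl
    (fun substrings subsize =>
      substrings ++ [(PySem.List.pyRange 0 (PySem.Str.len in_string - subsize + 1)).map
        (fun i => PySem.Str.slice in_string (some i) (some (i + subsize)))]) []

def find_repeated_substrings (in_string : String) (min_size : Int) (max_size : Int) : List (String × List Int) :=
  let all_substrings := find_all_substrings in_string min_size max_size
  (all_substrings.foldl (fun all_distances subsplit =>
    (PySem.List.enumerate subsplit).foldl (fun all_distances p =>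
      if (PySem.List.slice subsplit (some (p.1 + 1)) none).contains p.2 then
        let matching_index : Int := p.1 + 1 + ((PySem.List.index? (PySem.List.slice subsplit (some (p.1 + 1)) none) p.2).getD 0 : Int)
        (if all_distances.contains p.2 = false then all_distances.insert p.2 ([] : List Int) else all_distances).modify p.2 [] (· ++ [matching_index - p.1])
      else all_distances) all_distances) (PySem.Dict.empty)).items

-- ===== PORT B =====
def find_repeated_substrings_alt (in_string : String) (min_size : Int) (max_size : Int) : List (String × List Int) :=
  let n := PySem.Str.len in_string
  ((PySem.List.pyRange min_size (max_size + 1)).foldl (fun all_distances subsize =>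
    let positions : PySem.Dict String (List Int) :=
      (PySem.List.pyRange 0 (n - subsize + 1)).foldl
        (fun positions i => positions.modify (PySem.Str.slice in_string (some i) (some (i + subsize))) [] (· ++ [i]))
        PySem.Dict.empty
    positions.items.foldl (fun all_distances kv =>
      if 1 < kv.2.length then
        all_distances.modify kv.1 []
          (· ++ (kv.2.zip (PySem.List.slice kv.2 (some 1) none)).map (fun pq => pq.2 - pq.1))
      else all_distances) all_distances) (PySem.Dict.empty)).items

-- ===== PRECONDITION & SPEC =====
def Spec_find_repeated_substrings (in_string : String) (min_size : Int) (max_size : Int) (out : List (String × List Int)) : Prop := out = find_repeated_substrings_alt in_string min_size max_size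
instance (in_string : String) (min_size : Int) (max_size : Int) (out : List (String × List Int)) : Decidable (Spec_find_repeated_substrings in_string min_size max_size out) := by unfold Spec_find_repeated_substrings; infer_instance

-- ===== CLAIM (what is proved, stated in full; the proofs are below) =====
def Claim_equal_find_repeated_substrings : Prop := ∀ (in_string : String) (min_size : Int) (max_size : Int), Dom_find_repeated_substrings in_string min_size max_size → Spec_find_repeated_substrings in_string min_size max_size (find_repeated_substrings in_string min_size max_size)

-- ===== LEMMAS AND PROOFS =====
def modApp (d : PySem.Dict String (List Int)) (k : String) (v : List Int) : PySem.Dict String (List Int) :=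
  d.modify k [] (· ++ v)

lemma modApp_modApp_self (d : PySem.Dict String (List Int)) (x : String) (v w : List Int) :
    modApp (modApp d x v) x w = modApp d x (v ++ w) := by
  simp [modApp, PySem.Dict.modify, PySem.Dict.insert_insert_self, PySem.Dict.getD_insert_self]

lemma keys_modApp (d : PySem.Dict String (List Int)) (x : String) (v : List Int) :
    (modApp d x v).keys = if d.contains x then d.keys else d.keys ++ [x] := by
  rw [modApp, PySem.Dict.keys_modify]
  by_cases h : d.contains x
  · simp [h, PySem.Dict.keys_insert_of_contains d _ h]
  · simp only [Bool.not_eq_true] at h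
    simp [h, PySem.Dict.keys_insert_of_not_contains d _ h]

lemma nodup_keys_modApp (d : PySem.Dict String (List Int)) (x : String) (v : List Int)
    (h : d.keys.Nodup) : (modApp d x v).keys.Nodup := by
  rw [keys_modApp]
  by_cases hc : d.contains x
  · simpa [hc]
  · simp only [Bool.not_eq_true] at hc
    have : x ∉ d.keys := by
      rw [PySem.Dict.contains_eq_decide_mem_keys] at hc
      simpa using hc
    simp only [hc, Bool.false_eq_true, if_false]
    rw [List.nodup_append]
    refine ⟨h, List.nodup_singleton x, ?_⟩
    intro a ha b hb
    simp only [List.mem_singleton] at hb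
    subst hb; intro hax; exact this (hax ▸ ha)

lemma mem_keys_modApp (d : PySem.Dict String (List Int)) (x y : String) (v : List Int) :
    y ∈ (modApp d x v).keys ↔ y = x ∨ y ∈ d.keys := by
  rw [modApp, PySem.Dict.keys_modify, PySem.Dict.mem_keys_insert]

lemma getD_modApp (d : PySem.Dict String (List Int)) (x y : String) (v : List Int) :
    (modApp d x v).getD y [] = if y = x then d.getD x [] ++ v else d.getD y [] := by
  rw [modApp, PySem.Dict.getD_modify]

lemma contains_modApp (d : PySem.Dict String (List Int)) (x y : String) (v : List Int) :
    (modApp d x v).contains y = (y == x || d.contains y) := by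
  rw [modApp, PySem.Dict.contains_modify]

lemma modApp_comm (d : PySem.Dict String (List Int)) (x k : String) (v u : List Int)
    (hne : x ≠ k) (hx : x ∈ d.keys) (hnd : d.keys.Nodup) :
    modApp (modApp d k u) x v = modApp (modApp d x v) k u := by
  have hcx : d.contains x = true := by
    rw [PySem.Dict.contains_eq_decide_mem_keys]; simpa using hx
  apply PySem.Dict.ext
  have hn1 : (modApp (modApp d k u) x v).keys.Nodup :=
    nodup_keys_modApp _ _ _ (nodup_keys_modApp _ _ _ hnd)
  have hn2 : (modApp (modApp d x v) k u).keys.Nodup :=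
    nodup_keys_modApp _ _ _ (nodup_keys_modApp _ _ _ hnd)
  rw [PySem.Dict.items_eq_map_keys _ hn1 ([] : List Int),
      PySem.Dict.items_eq_map_keys _ hn2 ([] : List Int)]
  have hkeys : (modApp (modApp d k u) x v).keys = (modApp (modApp d x v) k u).keys := by
    rw [keys_modApp, keys_modApp, keys_modApp, keys_modApp]
    simp [contains_modApp, hcx, Ne.symm hne]
  rw [hkeys]
  apply List.map_congr_left
  intro a _
  simp only [getD_modApp]
  by_cases h1 : a = x <;> by_cases h2 : a = k <;> simp [h1, h2, hne, Ne.symm hne]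

def posI (k : String) : List String → List Int
  | [] => []
  | y :: r => (if y = k then [(0 : Int)] else []) ++ (posI k r).map (· + 1)

def diffs (l : List Int) : List Int := (l.zip l.tail).map (fun pq => pq.2 - pq.1)

def Fgrp (xs : List String) (k : String) : Option (String × List Int) :=
  if 1 < (posI k xs).length then some (k, diffs (posI k xs)) else none

def grp (xs : List String) : List (String × List Int) := (PySem.Set.ofList xs).filterMap (Fgrp xs)

lemma posI_nil_of_not_mem (k : String) (r : List String) (h : k ∉ r) : posI k r = [] := by
  induction r with
  | nil => rfl
  | cons y t ih =>
    simp only [List.mem_cons, not_or] at h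
    simp [posI, Ne.symm h.1, ih h.2]

lemma length_posI_pos (k : String) (r : List String) (h : k ∈ r) : 0 < (posI k r).length := by
  induction r with
  | nil => simp at h
  | cons y t ih =>
    rcases List.mem_cons.mp h with h1 | h2
    · simp [posI, h1]
    · by_cases hy : y = k
      · simp [posI, hy]
      · simp only [posI, hy, List.nil_append, List.length_map, if_false]
        have := ih h2; simpa using this

lemma posI_head (x : String) (r : List String) (h : x ∈ r) :
    ∃ t, posI x r = (((PySem.List.index? r x).getD 0 : Nat) : Int) :: t := by
  induction r with
  | nil => simp at h
  | cons y t ih =>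
    by_cases hy : y = x
    · subst hy
      rw [PySem.List.index?_cons_self]
      exact ⟨(posI y t).map (· + 1), by simp [posI]⟩
    · have hx : x ∈ t := by rcases List.mem_cons.mp h with h1 | h2; exact absurd h1.symm hy; exact h2
      obtain ⟨tl, htl⟩ := ih hx
      rw [PySem.List.index?_cons_of_ne t hy]
      refine ⟨tl.map (· + 1), ?_⟩
      rw [PySem.List.index?_eq_idxOf?] at htl ⊢
      cases e : List.idxOf? x t with
      | none => exact absurd (List.idxOf?_eq_none_iff.mp e) (by simpa using hx)
      | some n =>
        rw [e] at htl
        simp [posI, hy, htl]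
lemma diffs_map_add (l : List Int) (c : Int) : diffs (l.map (· + c)) = diffs l := by
  have ht : (l.map (· + c)).tail = l.tail.map (· + c) := by
    cases l <;> simp
  simp only [diffs, ht, List.zip_map, List.map_map]
  apply List.map_congr_left
  intro a _
  simp [Prod.map]
lemma diffs_cons_cons (a b : Int) (l : List Int) : diffs (a :: b :: l) = (b - a) :: diffs (b :: l) := by
  simp [diffs]
lemma diffs_short (l : List Int) (h : l.length ≤ 1) : diffs l = [] := by
  match l, h with
  | [], _ => rfl
  | [a], _ => rfl
lemma diffs_cons_zero (x : String) (r : List String) (h : x ∈ r) :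
    diffs ((0 : Int) :: (posI x r).map (· + 1)) =
      (1 + ((PySem.List.index? r x).getD 0 : Int)) :: diffs (posI x r) := by
  obtain ⟨t, ht⟩ := posI_head x r h
  rw [ht]
  simp only [List.map_cons, diffs_cons_cons]
  rw [show ((((PySem.List.index? r x).getD 0 : Nat) : Int) + 1) :: t.map (· + 1)
      = ((((PySem.List.index? r x).getD 0 : Nat) : Int) :: t).map (· + 1) by simp]
  rw [diffs_map_add]
  norm_num
  ring
lemma set_update_eq (r : List String) : ∀ s : PySem.Set String,
    PySem.Set.update s r = s ++ (PySem.Set.ofList r).filter (fun a => !s.contains a) := by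
  induction r with
  | nil => intro s; simp [PySem.Set.update, PySem.Set.ofList, PySem.Set.empty]
  | cons y t ih =>
    intro s
    have hof : PySem.Set.ofList (y :: t) = PySem.Set.update [y] t := by
      simp [PySem.Set.ofList, PySem.Set.update, PySem.Set.add, PySem.Set.empty, PySem.Set.contains]
    have hupd : PySem.Set.update s (y :: t) = PySem.Set.update (PySem.Set.add s y) t := by
      simp [PySem.Set.update]
    rw [hupd, ih, hof, ih]
    rw [List.filter_append, List.filter_filter]
    simp only [PySem.Set.contains, PySem.Set.add, List.filter_cons, List.filter_nil,
      List.contains_eq_mem]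
    by_cases hm : y ∈ s
    · simp only [hm, decide_true, if_true, Bool.not_true, Bool.false_eq_true, if_false,
        List.nil_append]
      congr 1
      apply List.filter_congr
      intro a _
      by_cases hay : a = y
      · subst hay; simp [hm]
      · simp [hay]
    · simp only [hm, decide_false, Bool.false_eq_true, if_false, Bool.not_false, if_true,
        List.append_assoc, List.singleton_append]
      congr 1
      congr 1
      apply List.filter_congr
      intro a _
      by_cases hay : a = y
      · subst hay; simp [hm]
      · simp [hay]

def extendAll (d : PySem.Dict String (List Int)) (l : List (String × List Int)) : PySem.Dict String (List Int) :=
  l.foldl (fun d p => modApp d p.1 p.2) d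

def goA (d : PySem.Dict String (List Int)) : List String → PySem.Dict String (List Int)
  | [] => d
  | x :: r => goA (if r.contains x then modApp d x [1 + ((PySem.List.index? r x).getD 0 : Int)] else d) r

lemma extendAll_cons (d : PySem.Dict String (List Int)) (p : String × List Int) (l : List (String × List Int)) :
    extendAll d (p :: l) = extendAll (modApp d p.1 p.2) l := rfl

lemma extendAll_append (d : PySem.Dict String (List Int)) (l₁ l₂ : List (String × List Int)) :
    extendAll d (l₁ ++ l₂) = extendAll (extendAll d l₁) l₂ := by
  simp [extendAll, List.foldl_append]

lemma nodup_keys_extendAll (l : List (String × List Int)) : ∀ d : PySem.Dict String (List Int),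
    d.keys.Nodup → (extendAll d l).keys.Nodup := by
  induction l with
  | nil => intro d h; exact h
  | cons p t ih => intro d h; exact ih _ (nodup_keys_modApp _ _ _ h)

lemma extendAll_keep (L : List (String × List Int)) : ∀ (D : PySem.Dict String (List Int))
    (x : String) (w : List Int), x ∈ D.keys → D.keys.Nodup → (∀ p ∈ L, p.1 ≠ x) →
    modApp (extendAll D L) x w = extendAll (modApp D x w) L := by
  induction L with
  | nil => intro D x w _ _ _; rfl
  | cons p t ih =>
    intro D x w hx hnd hL
    rw [extendAll_cons, extendAll_cons]
    rw [ih _ x w ((mem_keys_modApp _ _ _ _).mpr (Or.inr hx)) (nodup_keys_modApp _ _ _ hnd)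
      (fun q hq => hL q (List.mem_cons_of_mem _ hq))]
    rw [modApp_comm D x p.1 w p.2 (Ne.symm (hL p (List.mem_cons_self))) hx hnd]

lemma ofList_cons (x : String) (r : List String) :
    PySem.Set.ofList (x :: r) = x :: (PySem.Set.ofList r).filter (fun a => !(a == x)) := by
  have h1 : PySem.Set.ofList (x :: r) = PySem.Set.update [x] r := by
    simp [PySem.Set.ofList, PySem.Set.update, PySem.Set.add, PySem.Set.empty, PySem.Set.contains]
  rw [h1, set_update_eq]
  simp only [PySem.Set.contains, List.singleton_append, List.cons.injEq, true_and]
  apply List.filter_congr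
  intro a _
  simp [Bool.beq_eq_decide_eq]

lemma mem_ofList' (x : String) (r : List String) : x ∈ PySem.Set.ofList r ↔ x ∈ r :=
  PySem.Set.mem_ofList r x

lemma Fgrp_eq_of_shift (x : String) (r : List String) (a : String) (ha : a ≠ x) :
    Fgrp (x :: r) a = Fgrp r a := by
  have hp : posI a (x :: r) = (posI a r).map (· + 1) := by
    simp [posI, Ne.symm ha]
  simp [Fgrp, hp, diffs_map_add]

lemma fst_of_Fgrp {xs : List String} {k : String} {p : String × List Int}
    (h : Fgrp xs k = some p) : p.1 = k := by
  by_cases hc : 1 < (posI k xs).length <;> simp [Fgrp, hc] at h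
  exact (congrArg Prod.fst h).symm

lemma grp_cons_not_mem (x : String) (r : List String) (h : x ∉ r) : grp (x :: r) = grp r := by
  rw [grp, ofList_cons, List.filterMap_cons]
  have hx : Fgrp (x :: r) x = none := by
    simp [Fgrp, posI, posI_nil_of_not_mem x r h]
  rw [hx]
  have hfilter : (PySem.Set.ofList r).filter (fun a => !(a == x)) = PySem.Set.ofList r := by
    apply List.filter_eq_self.mpr
    intro a ha
    have : a ∈ r := (mem_ofList' a r).mp ha
    have hax : ¬ a = x := fun he => h (he ▸ this)
    simp [hax]
  rw [hfilter, grp]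
  apply List.filterMap_congr
  intro a ha
  exact Fgrp_eq_of_shift x r a (fun he => h (he ▸ (mem_ofList' a r).mp ha))

lemma grp_cons_mem (x : String) (r : List String) (h : x ∈ r) :
    grp (x :: r) = (x, (1 + ((PySem.List.index? r x).getD 0 : Int)) :: diffs (posI x r)) ::
      ((PySem.Set.ofList r).filter (fun a => !(a == x))).filterMap (Fgrp r) := by
  rw [grp, ofList_cons, List.filterMap_cons]
  have hpos : posI x (x :: r) = 0 :: (posI x r).map (· + 1) := by simp [posI]
  have hx : Fgrp (x :: r) x =
      some (x, (1 + ((PySem.List.index? r x).getD 0 : Int)) :: diffs (posI x r)) := by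
    rw [Fgrp, hpos]
    rw [if_pos (by simp; exact length_posI_pos x r h)]
    rw [diffs_cons_zero x r h]
  rw [hx]
  dsimp only
  congr 1
  apply List.filterMap_congr
  intro a ha
  have := List.of_mem_filter ha
  have hax : a ≠ x := by simpa using this
  exact Fgrp_eq_of_shift x r a hax

lemma goA_eq (xs : List String) : ∀ d : PySem.Dict String (List Int), d.keys.Nodup →
    goA d xs = extendAll d (grp xs) := by
  induction xs with
  | nil => intro d _; rfl
  | cons x r ih =>
    intro d hnd
    by_cases hm : x ∈ r
    · have hc : r.contains x = true := List.elem_eq_true_of_mem hm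
      rw [goA, if_pos hc, ih _ (nodup_keys_modApp _ _ _ hnd)]
      rw [grp_cons_mem x r hm, extendAll_cons]
      -- decompose ofList r around x
      obtain ⟨K1, K2, hsplit⟩ := List.append_of_mem ((mem_ofList' x r).mpr hm)
      have hnod : (PySem.Set.ofList r).Nodup := PySem.Set.nodup_ofList r
      rw [hsplit] at hnod
      rcases List.nodup_append.mp hnod with ⟨hn1, hn2, hdisj⟩
      have hxK1 : x ∉ K1 := fun hx => hdisj x hx x (by simp) rfl
      have hxK2 : x ∉ K2 := (List.nodup_cons.mp hn2).1
      have hfilter : (PySem.Set.ofList r).filter (fun a => !(a == x)) = K1 ++ K2 := by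
        rw [hsplit, List.filter_append, List.filter_cons]
        rw [List.filter_eq_self.mpr (fun a ha => by
            have : ¬ a = x := fun he => hxK1 (he ▸ ha); simp [this]),
          List.filter_eq_self.mpr (fun a ha => by
            have : ¬ a = x := fun he => hxK2 (he ▸ ha); simp [this])]
        simp
      have hgrpr : grp r = (K1.filterMap (Fgrp r)) ++ ((x :: K2).filterMap (Fgrp r)) := by
        rw [grp, hsplit, List.filterMap_append]
      have hA1 : ∀ p ∈ K1.filterMap (Fgrp r), p.1 ≠ x := by
        intro p hp
        obtain ⟨k, hk, hfk⟩ := List.mem_filterMap.mp hp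
        rw [fst_of_Fgrp hfk]
        exact fun he => hxK1 (he ▸ hk)
      rw [hfilter]
      set idx : Int := ((PySem.List.index? r x).getD 0 : Int) with hidx
      by_cases hlen : 1 < (posI x r).length
      · have hfx : Fgrp r x = some (x, diffs (posI x r)) := by simp [Fgrp, hlen]
        rw [hgrpr, List.filterMap_cons, hfx]
        dsimp only
        rw [extendAll_append, extendAll_cons]
        rw [extendAll_keep (K1.filterMap (Fgrp r)) (modApp d x [1 + idx]) x (diffs (posI x r))
          ((mem_keys_modApp _ _ _ _).mpr (Or.inl rfl)) (nodup_keys_modApp _ _ _ hnd) hA1]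
        rw [modApp_modApp_self]
        rw [List.filterMap_append, extendAll_append]
        rw [show ([1 + idx] ++ diffs (posI x r)) = (1 + idx) :: diffs (posI x r) from rfl]
      · have hfx : Fgrp r x = none := by simp [Fgrp, hlen]
        rw [hgrpr, List.filterMap_cons, hfx]
        dsimp only
        have hw : diffs (posI x r) = [] := diffs_short _ (by omega)
        rw [hw, List.filterMap_append, extendAll_append]
    · have hc : r.contains x = false := by
        cases e : r.contains x; rfl; exact absurd (List.mem_of_elem_eq_true e) hm
      rw [goA, if_neg (by simp [hm]), grp_cons_not_mem x r hm]
      exact ih d hnd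

-- ===== A literal-body bridge =====
lemma A_push (all : PySem.Dict String (List Int)) (k : String) (v : List Int) :
    (if all.contains k = false then all.insert k ([] : List Int) else all).modify k [] (· ++ v)
      = modApp all k v := by
  by_cases hc : all.contains k = true
  · rw [if_neg (by simp [hc])]; rfl
  · have hc' : all.contains k = false := by cases e : all.contains k; rfl; exact absurd e hc
    rw [if_pos hc']
    show ((all.insert k []).insert k _) = _
    rw [PySem.Dict.insert_insert_self, PySem.Dict.getD_insert_self]
    show _ = all.insert k (all.getD k [] ++ v)
    rw [PySem.Dict.getD_of_not_contains all [] hc']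

def bodyA (xs : List String) (all_distances : PySem.Dict String (List Int)) (p : Int × String) :
    PySem.Dict String (List Int) :=
  if (PySem.List.slice xs (some (p.1 + 1)) none).contains p.2 then
    let matching_index : Int := p.1 + 1 + ((PySem.List.index? (PySem.List.slice xs (some (p.1 + 1)) none) p.2).getD 0 : Int)
    (if all_distances.contains p.2 = false then all_distances.insert p.2 ([] : List Int) else all_distances).modify p.2 [] (· ++ [matching_index - p.1])
  else all_distances

lemma A_inner_aux (r : List String) : ∀ (pre : List String) (d : PySem.Dict String (List Int)),
    (PySem.List.enumerate r (pre.length : Int)).foldl (bodyA (pre ++ r)) d = goA d r := by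
  induction r with
  | nil => intro pre d; rfl
  | cons x t ih =>
    intro pre d
    rw [PySem.List.enumerate_cons]
    rw [List.foldl_cons]
    have hslice : PySem.List.slice (pre ++ x :: t) (some ((pre.length : Int) + 1)) none = t := by
      rw [show ((pre.length : Int) + 1) = ((pre.length + 1 : Nat) : Int) by push_cast; ring]
      rw [PySem.List.slice_from_natCast]
      rw [show pre ++ x :: t = (pre ++ [x]) ++ t by simp]
      rw [show pre.length + 1 = (pre ++ [x]).length by simp]
      exact List.drop_left
    have hD : bodyA (pre ++ x :: t) d ((pre.length : Int), x)
        = (if t.contains x then modApp d x [1 + ((PySem.List.index? t x).getD 0 : Int)] else d) := by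
      rw [bodyA]
      simp only [hslice]
      by_cases hc : t.contains x = true
      · rw [if_pos hc, if_pos hc]
        rw [show ((pre.length : Int) + 1 + ((PySem.List.index? t x).getD 0 : Int) - (pre.length : Int))
            = 1 + ((PySem.List.index? t x).getD 0 : Int) by ring]
        exact A_push d x _
      · rw [if_neg hc, if_neg hc]
    rw [hD]
    have harg : pre ++ x :: t = (pre ++ [x]) ++ t := by simp
    have hstart : (pre.length : Int) + 1 = (((pre ++ [x]).length : Nat) : Int) := by
      simp
    rw [harg, hstart, ih (pre ++ [x])]
    rw [goA]

lemma A_inner (xs : List String) (d : PySem.Dict String (List Int)) :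
    (PySem.List.enumerate xs).foldl (bodyA xs) d = goA d xs := by
  have := A_inner_aux xs [] d
  simpa using this

-- ===== B side =====
lemma enum_map_pyRange {α : Type} (g : Int → α) (b : Int) : ∀ (a : Int),
    PySem.List.enumerate ((PySem.List.pyRange a b).map g) a =
      (PySem.List.pyRange a b).map (fun i => (i, g i)) := by
  suffices h : ∀ (n : Nat) (a : Int), (b - a).toNat = n →
      PySem.List.enumerate ((PySem.List.pyRange a b).map g) a =
        (PySem.List.pyRange a b).map (fun i => (i, g i)) by
    intro a; exact h _ a rfl
  intro n
  induction n with
  | zero =>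
    intro a h
    rw [PySem.List.pyRange_one_eq_nil (by omega)]
    rfl
  | succ m ihm =>
    intro a h
    rw [PySem.List.pyRange_one_cons (by omega)]
    simp only [List.map_cons, PySem.List.enumerate_cons]
    rw [ihm (a + 1) (by omega)]

lemma posfilter_eq (c : String) (xs : List String) : ∀ s : Int,
    ((PySem.List.enumerate xs s).filter (fun p => p.2 == c)).map (fun p => p.1)
      = (posI c xs).map (· + s) := by
  induction xs with
  | nil => intro s; rfl
  | cons y t ih =>
    intro s
    rw [PySem.List.enumerate_cons, List.filter_cons]
    by_cases hy : y = c
    · rw [if_pos (by simp [hy])]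
      simp only [List.map_cons]
      rw [ih (s + 1)]
      have hpos : posI c (y :: t) = 0 :: (posI c t).map (· + 1) := by simp [posI, hy]
      rw [hpos]
      simp only [List.map_cons, List.map_map]
      congr 1
      · omega
      · apply List.map_congr_left; intro a _; simp [Function.comp]; ring
    · rw [if_neg (by simp [hy])]
      have hyne : ¬ (y = c) := hy
      simp only [posI, hyne, if_false, List.nil_append]
      rw [ih (s + 1), List.map_map]
      apply List.map_congr_left
      intro a _
      simp
      ring

lemma posFold_getD (xs : List String) (c : String) :
    ((PySem.List.enumerate xs).foldl (fun pos p => pos.modify p.2 [] (· ++ [p.1])) PySem.Dict.empty).getD c []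
      = posI c xs := by
  have hswap : (PySem.List.enumerate xs).foldl (fun pos p => pos.modify p.2 [] (· ++ [p.1])) PySem.Dict.empty
      = ((PySem.List.enumerate xs).map Prod.swap).foldl
          (fun pos q => pos.modify q.1 [] (· ++ [q.2])) PySem.Dict.empty := by
    rw [List.foldl_map]
    rfl
  rw [hswap, PySem.Dict.getD_foldl_modify_append, PySem.Dict.getD_empty, List.nil_append]
  rw [List.filter_map, List.map_map]
  have h1 : ((PySem.List.enumerate xs).filter ((fun p => p.1 == c) ∘ Prod.swap))
      = (PySem.List.enumerate xs).filter (fun p => p.2 == c) := by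
    apply List.filter_congr; intro p _; rfl
  rw [h1]
  have h2 : (List.map ((fun x => x.2) ∘ Prod.swap) ((PySem.List.enumerate xs).filter (fun p => p.2 == c)))
      = ((PySem.List.enumerate xs).filter (fun p => p.2 == c)).map (fun p => p.1) := by
    apply List.map_congr_left; intro p _; rfl
  rw [h2, posfilter_eq c xs 0]
  apply (List.map_congr_left (fun a _ => by simp)).trans (List.map_id _)

lemma posFold_items (xs : List String) :
    ((PySem.List.enumerate xs).foldl (fun pos p => pos.modify p.2 [] (· ++ [p.1])) PySem.Dict.empty).items
      = (PySem.Set.ofList xs).map (fun k => (k, posI k xs)) := by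
  have hkeys : ((PySem.List.enumerate xs).foldl (fun pos p => pos.modify p.2 [] (· ++ [p.1])) PySem.Dict.empty).keys
      = PySem.Set.ofList xs := by
    rw [PySem.Dict.keys_foldl_modify_key (PySem.List.enumerate xs) Prod.snd [] (fun _ p => (· ++ [p.1]))]
    rw [PySem.Dict.keys_empty]
    rw [show List.map Prod.snd (PySem.List.enumerate xs) = xs from PySem.List.map_snd_enumerate xs 0]
    rfl
  have hnd : ((PySem.List.enumerate xs).foldl (fun pos p => pos.modify p.2 [] (· ++ [p.1])) PySem.Dict.empty).keys.Nodup := by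
    rw [hkeys]; exact PySem.Set.nodup_ofList xs
  rw [PySem.Dict.items_eq_map_keys _ hnd ([] : List Int), hkeys]
  apply List.map_congr_left
  intro k _
  rw [posFold_getD]

lemma B_fold_if (l : List (String × List Int)) : ∀ d,
    l.foldl (fun all kv => if 1 < kv.2.length then modApp all kv.1 (diffs kv.2) else all) d
      = extendAll d (l.filterMap (fun kv => if 1 < kv.2.length then some (kv.1, diffs kv.2) else none)) := by
  induction l with
  | nil => intro d; rfl
  | cons p t ih =>
    intro d
    rw [List.foldl_cons, List.filterMap_cons]
    by_cases hp : 1 < p.2.length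
    · rw [if_pos hp, if_pos hp, ih]; rfl
    · rw [if_neg hp, if_neg hp, ih]

def substr (s : String) (z : Int) : List String :=
  (PySem.List.pyRange 0 (PySem.Str.len s - z + 1)).map (fun i => PySem.Str.slice s (some i) (some (i + z)))

lemma B_positions (s : String) (z : Int) :
    (PySem.List.pyRange 0 (PySem.Str.len s - z + 1)).foldl
      (fun pos i => pos.modify (PySem.Str.slice s (some i) (some (i + z))) [] (· ++ [i]))
      PySem.Dict.empty
    = (PySem.List.enumerate (substr s z)).foldl
        (fun pos p => pos.modify p.2 [] (· ++ [p.1])) PySem.Dict.empty := by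
  rw [show PySem.List.enumerate (substr s z)
      = (PySem.List.pyRange 0 (PySem.Str.len s - z + 1)).map
          (fun i => (i, PySem.Str.slice s (some i) (some (i + z)))) from
    enum_map_pyRange (fun i => PySem.Str.slice s (some i) (some (i + z))) (PySem.Str.len s - z + 1) 0]
  rw [List.foldl_map]

lemma innerB_eq (s : String) (z : Int) (d : PySem.Dict String (List Int)) :
    ((PySem.List.pyRange 0 (PySem.Str.len s - z + 1)).foldl
      (fun pos i => pos.modify (PySem.Str.slice s (some i) (some (i + z))) [] (· ++ [i]))
      PySem.Dict.empty).items.foldl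
      (fun all kv => if 1 < kv.2.length then
        all.modify kv.1 [] (· ++ (kv.2.zip (PySem.List.slice kv.2 (some 1) none)).map (fun pq => pq.2 - pq.1))
      else all) d
    = extendAll d (grp (substr s z)) := by
  have hbody : ∀ (acc : PySem.Dict String (List Int)) (kv : String × List Int),
      (if 1 < kv.2.length then
        acc.modify kv.1 [] (· ++ (kv.2.zip (PySem.List.slice kv.2 (some 1) none)).map (fun pq => pq.2 - pq.1))
      else acc)
      = (if 1 < kv.2.length then modApp acc kv.1 (diffs kv.2) else acc) := by
    intro acc kv
    rw [PySem.List.slice_from_one]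
    rfl
  rw [PySem.List.foldl_congr_mem _ _ _ d (fun acc kv _ => hbody acc kv)]
  rw [B_positions, posFold_items, B_fold_if, List.filterMap_map]
  rfl

-- ===== assembling the two ports =====
lemma find_all_eq (s : String) (mn mx : Int) :
    find_all_substrings s mn mx = (PySem.List.pyRange mn (mx + 1)).map (substr s) := by
  rw [find_all_substrings]
  rw [PySem.List.foldl_append_singleton_eq_map]
  rfl

lemma outer_eq (s : String) (zs : List Int) : ∀ d : PySem.Dict String (List Int), d.keys.Nodup →
    zs.foldl (fun all z => (PySem.List.enumerate (substr s z)).foldl (bodyA (substr s z)) all) d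
      = zs.foldl (fun all z =>
          ((PySem.List.pyRange 0 (PySem.Str.len s - z + 1)).foldl
            (fun pos i => pos.modify (PySem.Str.slice s (some i) (some (i + z))) [] (· ++ [i]))
            PySem.Dict.empty).items.foldl
            (fun all kv => if 1 < kv.2.length then
              all.modify kv.1 [] (· ++ (kv.2.zip (PySem.List.slice kv.2 (some 1) none)).map (fun pq => pq.2 - pq.1))
            else all) all) d := by
  induction zs with
  | nil => intro d _; rfl
  | cons z t ih =>
    intro d hnd
    rw [List.foldl_cons, List.foldl_cons]
    rw [A_inner, goA_eq _ _ hnd, innerB_eq]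
    exact ih _ (nodup_keys_extendAll _ _ hnd)

lemma main_eq (s : String) (mn mx : Int) :
    find_repeated_substrings s mn mx = find_repeated_substrings_alt s mn mx := by
  have hA : find_repeated_substrings s mn mx
      = (((PySem.List.pyRange mn (mx + 1)).map (substr s)).foldl
          (fun all subsplit => (PySem.List.enumerate subsplit).foldl (bodyA subsplit) all)
          PySem.Dict.empty).items := by
    rw [← find_all_eq]
    rfl
  rw [hA, List.foldl_map]
  rw [outer_eq s (PySem.List.pyRange mn (mx + 1)) PySem.Dict.empty (by
    rw [PySem.Dict.keys_empty]; exact List.nodup_nil)]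
  rfl

-- ===== VERDICT (by name: the statement is the Claim_ definition above) =====
theorem find_repeated_substrings_spec : Claim_equal_find_repeated_substrings := by
  intro in_string min_size max_size _
  unfold Spec_find_repeated_substrings
  exact main_eq in_string min_size max_size
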